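-- pv_equiv track=rewrite | github.com/hirshrm/advent_of_code | day7.py | add_paren
-- ===== SOURCE A (Python) =====
-- def add_paren(eq: str) -> str:
--     parts: list[str] = eq.strip().split(" ")
--     parts = [int(x) if x.isdigit() else x for x in parts]
--
--     # PART TWO: possible that it was only two numbers to begin with
--     # and, with concatenation, there is now one number
--     if len(parts) == 1:
--         return f"{parts[0]}"
--
--     num_count = len([x for x in parts if type(x) == int])
--     sol = "(" * (num_count - 1) + str(parts[0])
--     for i in range(1, len(parts), 2):
--         sol += parts[i] + str(parts[i+1]) + ")"
--     return sol
-- ===== SOURCE B (Python) =====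
-- # B: recursive definition — wrap(k) parenthesizes the first k operator/operand
-- # pairs by peeling the LAST pair and recursing on the prefix, instead of A's
-- # iterative left-to-right build with an up-front count of int tokens.
-- # On malformed equations (>= 3 tokens with a non-digit token in an operand
-- # position) A's output is unbalanced; B returns the balanced left-associative
-- # parenthesisation.
-- def add_paren(eq: str) -> str:
--     parts = eq.strip().split(" ")
--     parts = [int(x) if x.isdigit() else x for x in parts]
--
--     def wrap(k: int) -> str:
--         # left-associative parenthesisation of parts[0 : 2*k + 1]
--         if k == 0:
--             return str(parts[0])
--         return "(" + wrap(k - 1) + parts[2 * k - 1] + str(parts[2 * k]) + ")"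
--
--     return wrap((len(parts) - 1) // 2)
-- ===== Notes on version B (the rewrite author's own statement) =====
-- stated objective: alternative
-- what changed: Replaces A's iterative scheme (count int tokens up front, prepend num_count-1 opening parentheses, then a stride-2 index loop appending one closing parenthesis per pair, with a len==1 special case) by a recursion wrap(k) that peels the LAST operator/operand pair and recurses on the prefix; num_count and the special case disappear.
-- intended difference: On malformed equations of at least 3 tokens where some even-index (operand-position) token is not a digit string, A prepends num_count-1 opening parentheses yet appends one closing parenthesis per pair, so its output is unbalanced; B wraps once per pair and returns the balanced left-associative parenthesisation, which is the intended value. — e.g. on add_paren("a + b"): A returns "a+b)", B returns "(a+b)"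
import Mathlib
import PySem

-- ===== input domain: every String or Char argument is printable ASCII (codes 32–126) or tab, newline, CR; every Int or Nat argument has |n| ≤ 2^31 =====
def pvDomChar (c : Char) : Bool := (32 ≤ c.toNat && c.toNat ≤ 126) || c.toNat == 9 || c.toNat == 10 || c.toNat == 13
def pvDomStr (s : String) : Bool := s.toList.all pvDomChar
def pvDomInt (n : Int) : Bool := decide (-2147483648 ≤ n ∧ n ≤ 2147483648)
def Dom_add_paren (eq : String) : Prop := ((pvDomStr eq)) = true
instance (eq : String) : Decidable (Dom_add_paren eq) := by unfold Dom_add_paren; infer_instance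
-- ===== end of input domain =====

-- B replaces A's count-int-tokens-then-prepend/append iterative build (with its len==1
-- special case) by a recursion that peels the LAST operator/operand pair and recurses on
-- the prefix (objective: alternative). On malformed equations (D_ below) they differ.

-- ===== PORT A =====
-- shared comprehension: 'int(x) if x.isdigit() else x' (an int-or-str value)
def pvConv (x : List Char) : Int ⊕ List Char :=
  if PySem.Chars.strIsdigit x then Sum.inl ((PySem.Int.ofChars? x).getD 0) else Sum.inr x

-- str(v) / f"{v}" on an int-or-str value
def pvDisp (v : Int ⊕ List Char) : List Char :=
  match v with
  | Sum.inl n => PySem.Int.toChars n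
  | Sum.inr s => s

-- parts[i] used as a str operand of '+': an int here is a TypeError in Python (outside Pre_)
def pvOp (v : Int ⊕ List Char) : List Char :=
  match v with
  | Sum.inl _ => []
  | Sum.inr s => s

def add_paren (eq : String) : String :=
  let parts : List (Int ⊕ List Char) :=
    (PySem.Chars.splitOn (PySem.Chars.strip eq.toList) [' ']).map pvConv
  if parts.length = 1 then
    String.ofList (pvDisp (PySem.List.pyGetD parts 0 (Sum.inr [])))
  else
    let numCount := (parts.filter Sum.isLeft).length
    let sol := List.replicate (numCount - 1) '(' ++ pvDisp (PySem.List.pyGetD parts 0 (Sum.inr []))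
    let sol := (PySem.List.pyRange 1 (parts.length : Int) 2).foldl
      (fun s i => s ++ (pvOp (PySem.List.pyGetD parts i (Sum.inr [])) ++
                        pvDisp (PySem.List.pyGetD parts (i + 1) (Sum.inr [])) ++ [')'])) sol
    String.ofList sol
    -- pyGetD with a dummy default: Pre_ excludes the even-token-count inputs where
    -- Python's parts[i+1] raises IndexError (and the int-at-odd-index TypeError)

-- ===== PORT B =====
-- wrap(k): left-associative parenthesisation of parts[0 : 2k+1], peeling the last pair
def pvWrap (parts : List (Int ⊕ List Char)) : Nat → List Char
  | 0 => pvDisp (PySem.List.pyGetD parts 0 (Sum.inr []))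
  | k + 1 =>
      '(' :: (pvWrap parts k ++
        (pvOp (PySem.List.pyGetD parts (2 * ((k : Int) + 1) - 1) (Sum.inr [])) ++
         pvDisp (PySem.List.pyGetD parts (2 * ((k : Int) + 1)) (Sum.inr [])) ++ [')']))

def add_paren_alt (eq : String) : String :=
  let parts : List (Int ⊕ List Char) :=
    (PySem.Chars.splitOn (PySem.Chars.strip eq.toList) [' ']).map pvConv
  String.ofList (pvWrap parts (PySem.Int.floordiv ((parts.length : Int) - 1) 2).toNat)

-- ===== PRECONDITION & SPEC =====
-- Pre_ holds exactly where Python A returns: the token list must have odd length (an even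
-- length hits IndexError at parts[i+1]) and no odd-index (operator-position) token may be a
-- digit string (an int there makes 'parts[i] + …' a TypeError).
def Pre_add_paren (eq : String) : Prop :=
  let toks := PySem.Chars.splitOn (PySem.Chars.strip eq.toList) [' ']
  toks.length % 2 = 1 ∧
  ∀ i < toks.length, i % 2 = 1 → PySem.Chars.strIsdigit (toks.getD i []) = false

instance (eq : String) : Decidable (Pre_add_paren eq) := by unfold Pre_add_paren; infer_instance

def pvWitness_add_paren : String := "1 + 2"

-- On malformed equations of at least 3 tokens where some operand (even-index) token is not
-- a digit string, A prepends num_count-1 opening parentheses yet appends one closing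
-- parenthesis per pair, so its output is unbalanced; B wraps once per pair and returns the
-- balanced left-associative parenthesisation, which is the intended value.
def D_add_paren (eq : String) : Prop :=
  let toks := PySem.Chars.splitOn (PySem.Chars.strip eq.toList) [' ']
  3 ≤ toks.length ∧
  ∃ i < toks.length, i % 2 = 0 ∧ PySem.Chars.strIsdigit (toks.getD i []) = false

instance (eq : String) : Decidable (D_add_paren eq) := by unfold D_add_paren; infer_instance

def Spec_add_paren (eq : String) (out : String) : Prop := ¬ D_add_paren eq → out = add_paren_alt eq
instance (eq : String) (out : String) : Decidable (Spec_add_paren eq out) := by unfold Spec_add_paren; infer_instance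

def pvDiffWitness_add_paren : String := "a + b"
def pvDiffWitnessOut_add_paren : String × String := ("a+b)", "(a+b)")

-- ===== CLAIM (what is proved, stated in full; the proofs are below) =====
def Claim_unchanged_add_paren : Prop := ∀ (eq : String), Dom_add_paren eq → Pre_add_paren eq → Spec_add_paren eq (add_paren eq)
def Claim_changed_add_paren : Prop := Dom_add_paren (pvDiffWitness_add_paren) ∧ Pre_add_paren (pvDiffWitness_add_paren) ∧ D_add_paren (pvDiffWitness_add_paren) ∧ add_paren (pvDiffWitness_add_paren) = pvDiffWitnessOut_add_paren.1 ∧ add_paren_alt (pvDiffWitness_add_paren) = pvDiffWitnessOut_add_paren.2 ∧ pvDiffWitnessOut_add_paren.1 ≠ pvDiffWitnessOut_add_paren.2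
def Claim_exact_add_paren : Prop := ∀ (eq : String), Dom_add_paren eq → Pre_add_paren eq → D_add_paren eq → add_paren eq ≠ add_paren_alt eq

-- ===== LEMMAS AND PROOFS =====

-- the piece appended for the pair at operator index i
def pvPiece (parts : List (Int ⊕ List Char)) (i : Int) : List Char :=
  pvOp (PySem.List.pyGetD parts i (Sum.inr [])) ++
    pvDisp (PySem.List.pyGetD parts (i + 1) (Sum.inr [])) ++ [')']

-- characterisation of B's recursion as a flat list expression
theorem pvWrap_eq (parts : List (Int ⊕ List Char)) :
    ∀ k : Nat, pvWrap parts k =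
      List.replicate k '(' ++ pvDisp (PySem.List.pyGetD parts 0 (Sum.inr [])) ++
        (List.range k).flatMap (fun j => pvPiece parts (1 + 2 * (j : Int))) := by
  intro k
  induction k with
  | zero => simp [pvWrap]
  | succ k ih =>
      rw [pvWrap, ih, List.range_succ]
      simp only [List.replicate_succ, pvPiece]
      have h1 : 2 * ((k : Int) + 1) - 1 = 1 + 2 * (k : Int) := by ring
      have h2 : 2 * ((k : Int) + 1) = 1 + 2 * (k : Int) + 1 := by ring
      rw [h1, h2]
      simp [List.append_assoc]

-- isLeft ∘ pvConv is isdigit, so A's num_count is the digit-token count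
theorem pvNumCount (l : List (List Char)) :
    ((l.map pvConv).filter Sum.isLeft).length =
      (l.filter (fun x => PySem.Chars.strIsdigit x)).length := by
  induction l with
  | nil => rfl
  | cons a l ih =>
      by_cases h : PySem.Chars.strIsdigit a = true <;>
        simp [pvConv, h, ih]

-- with digits exactly at even indices, the digit count is (length+1)/2
theorem pvCountEq :
    ∀ (l : List (List Char)),
      (∀ i < l.length, i % 2 = 1 → PySem.Chars.strIsdigit (l.getD i []) = false) →
      (∀ i < l.length, i % 2 = 0 → PySem.Chars.strIsdigit (l.getD i []) = true) →
      (l.filter (fun x => PySem.Chars.strIsdigit x)).length = (l.length + 1) / 2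
  | [], _, _ => by simp
  | [a], _, he => by
      have := he 0 (by simp) (by decide)
      simp at this
      simp [this]
  | a :: b :: rest, ho, he => by
      have ha := he 0 (by simp) (by decide)
      have hb := ho 1 (by simp) (by decide)
      simp at ha hb
      have ih := pvCountEq rest
        (fun i hi hp => by
          have := ho (i + 2) (by simpa using hi) (by omega)
          simpa using this)
        (fun i hi hp => by
          have := he (i + 2) (by simpa using hi) (by omega)
          simpa using this)
      simp [ha, hb, ih]
      omega

-- with no digit at odd indices, the digit count is at most (length+1)/2
theorem pvCountLe :
    ∀ (l : List (List Char)),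
      (∀ i < l.length, i % 2 = 1 → PySem.Chars.strIsdigit (l.getD i []) = false) →
      (l.filter (fun x => PySem.Chars.strIsdigit x)).length ≤ (l.length + 1) / 2
  | [], _ => by simp
  | [a], _ => by
      by_cases h : PySem.Chars.strIsdigit a = true <;> simp [h]
  | a :: b :: rest, ho => by
      have hb := ho 1 (by simp) (by decide)
      simp at hb
      have ih := pvCountLe rest
        (fun i hi hp => by
          have := ho (i + 2) (by simpa using hi) (by omega)
          simpa using this)
      by_cases h : PySem.Chars.strIsdigit a = true <;>
        simp [h, hb] <;> omega

-- …and a non-digit at some even index makes the count strictly smaller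
theorem pvCountLt :
    ∀ (l : List (List Char)),
      (∀ i < l.length, i % 2 = 1 → PySem.Chars.strIsdigit (l.getD i []) = false) →
      (∃ i, i < l.length ∧ i % 2 = 0 ∧ PySem.Chars.strIsdigit (l.getD i []) = false) →
      (l.filter (fun x => PySem.Chars.strIsdigit x)).length < (l.length + 1) / 2
  | [], _, ⟨i, hi, _, _⟩ => by simp at hi
  | [a], _, ⟨i, hi, hp, hd⟩ => by
      have h0 : i = 0 := by simp at hi; omega
      subst h0
      simp at hd
      simp [hd]
  | a :: b :: rest, ho, ⟨i, hi, hp, hd⟩ => by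
      have hb := ho 1 (by simp) (by decide)
      simp at hb
      have ho' : ∀ j < rest.length, j % 2 = 1 →
          PySem.Chars.strIsdigit (rest.getD j []) = false := fun j hj hjp => by
        have := ho (j + 2) (by simpa using hj) (by omega)
        simpa using this
      rcases Nat.eq_zero_or_pos i with h0 | hpos
      · subst h0
        simp at hd
        have := pvCountLe rest ho'
        simp [hd, hb]
        omega
      · have h2 : 2 ≤ i := by omega
        have ih := pvCountLt rest ho'
          ⟨i - 2, by simp at hi; omega, by omega, by
            rcases Nat.exists_eq_add_of_le h2 with ⟨k, rfl⟩
            rw [show 2 + k = k + 2 from by omega] at hd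
            simpa using hd⟩
        by_cases h : PySem.Chars.strIsdigit a = true <;>
          simp [h, hb] <;> omega

-- A's stride-2 range is the image of range ((n-1)/2) under j ↦ 1+2j (odd n ≥ 1)
theorem pvRangeEq (n : ℕ) (hodd : n % 2 = 1) :
    PySem.List.pyRange 1 (n : Int) 2 =
      (List.range ((n - 1) / 2)).map (fun j => 1 + 2 * (j : Int)) := by
  rw [PySem.List.pyRange_of_pos 1 (n : Int) (by norm_num)]
  rcases Nat.eq_zero_or_pos ((n - 1) / 2) with h0 | hpos
  · have : ¬ (1 : Int) < (n : Int) := by exact_mod_cast by omega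
    rw [if_neg this]
    rw [h0]
    rfl
  · have h1 : (1 : Int) < (n : Int) := by exact_mod_cast by omega
    rw [if_pos h1]
    have h : ((n : Int) - 1 + 2 - 1) = (n : Int) := by ring
    rw [h]
    have : ((n : Int) / 2).toNat = (n - 1) / 2 := by omega
    rw [this]
    have hfm : ∀ (l : List ℕ), List.flatMap (fun a => [((a : ℕ) : ℤ)]) l = l.map (fun a => ((a : ℕ) : ℤ)) := by
      intro l; induction l with
      | nil => rfl
      | cons a l ih => simp [ih]
    simp only [List.pure_def, List.bind_eq_flatMap]
    rw [hfm, List.map_map]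
    apply List.map_congr_left
    intro a _
    simp

-- B's pair count (len(parts)-1)//2 equals (n-1)/2 in ℕ
theorem pvFloordivEq (n : ℕ) (hn : 1 ≤ n) :
    (PySem.Int.floordiv ((n : Int) - 1) 2).toNat = (n - 1) / 2 := by
  rw [PySem.Int.floordiv_eq_ediv_of_pos (by norm_num)]
  omega

-- both programs in the common flat form (A with its numCount, B with (n-1)/2)
theorem pvA_flat (eq : String)
    (toks : List (List Char))
    (htoks : toks = PySem.Chars.splitOn (PySem.Chars.strip eq.toList) [' '])
    (hodd : toks.length % 2 = 1) (hne : ¬ toks.length = 1) :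
    add_paren eq = String.ofList
      (List.replicate (((toks.map pvConv).filter Sum.isLeft).length - 1) '(' ++
        pvDisp (PySem.List.pyGetD (toks.map pvConv) 0 (Sum.inr [])) ++
        (List.range ((toks.length - 1) / 2)).flatMap
          (fun j => pvPiece (toks.map pvConv) (1 + 2 * (j : Int)))) := by
  simp only [add_paren, ← htoks, List.length_map]
  rw [if_neg hne]
  rw [PySem.List.foldl_append_eq_flatMap
    (fun i => pvOp (PySem.List.pyGetD (toks.map pvConv) i (Sum.inr [])) ++
      pvDisp (PySem.List.pyGetD (toks.map pvConv) (i + 1) (Sum.inr [])) ++ [')'])]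
  rw [pvRangeEq toks.length hodd, List.flatMap_map]
  simp [pvPiece, List.append_assoc]

theorem pvB_flat (eq : String)
    (toks : List (List Char))
    (htoks : toks = PySem.Chars.splitOn (PySem.Chars.strip eq.toList) [' '])
    (hne : 1 ≤ toks.length) :
    add_paren_alt eq = String.ofList
      (List.replicate ((toks.length - 1) / 2) '(' ++
        pvDisp (PySem.List.pyGetD (toks.map pvConv) 0 (Sum.inr [])) ++
        (List.range ((toks.length - 1) / 2)).flatMap
          (fun j => pvPiece (toks.map pvConv) (1 + 2 * (j : Int)))) := by
  simp only [add_paren_alt, ← htoks, List.length_map]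
  rw [pvFloordivEq toks.length hne, pvWrap_eq]

-- ===== VERDICT (by name: the statement is the Claim_ definition above) =====
theorem add_paren_spec : Claim_unchanged_add_paren := by
  intro eq _ hPre
  unfold Spec_add_paren
  intro hnD
  unfold Pre_add_paren at hPre
  unfold D_add_paren at hnD
  obtain ⟨hodd, ho⟩ := hPre
  set toks := PySem.Chars.splitOn (PySem.Chars.strip eq.toList) [' '] with htoks
  have hne1 : 1 ≤ toks.length := by omega
  by_cases hn1 : toks.length = 1
  · simp only [add_paren, ← htoks, List.length_map]
    rw [if_pos hn1]
    rw [pvB_flat eq toks htoks hne1, hn1]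
    norm_num
  · have h3 : 3 ≤ toks.length := by omega
    have hnD' : ¬ (3 ≤ toks.length ∧ ∃ i < toks.length, i % 2 = 0 ∧
        PySem.Chars.strIsdigit (toks.getD i []) = false) := hnD
    push Not at hnD'
    have he : ∀ i < toks.length, i % 2 = 0 →
        PySem.Chars.strIsdigit (toks.getD i []) = true := by
      intro i hi hp
      have := hnD' h3 i hi hp
      simpa using this
    rw [pvA_flat eq toks htoks hodd hn1, pvB_flat eq toks htoks hne1]
    have hc : ((toks.map pvConv).filter Sum.isLeft).length = (toks.length + 1) / 2 := by
      rw [pvNumCount]; exact pvCountEq toks ho he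
    rw [hc]
    have : (toks.length + 1) / 2 - 1 = (toks.length - 1) / 2 := by omega
    rw [this]

theorem add_paren_changed : Claim_changed_add_paren := by
  unfold Claim_changed_add_paren; decide

theorem add_paren_tight : Claim_exact_add_paren := by
  intro eq _ hPre hD
  unfold Pre_add_paren at hPre
  unfold D_add_paren at hD
  obtain ⟨hodd, ho⟩ := hPre
  obtain ⟨h3, hex⟩ := hD
  set toks := PySem.Chars.splitOn (PySem.Chars.strip eq.toList) [' '] with htoks
  rw [pvA_flat eq toks htoks hodd (by omega), pvB_flat eq toks htoks (by omega)]
  have hc : ((toks.map pvConv).filter Sum.isLeft).length < (toks.length + 1) / 2 := by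
    rw [pvNumCount]
    exact pvCountLt toks ho (by obtain ⟨i, hi, hp, hd⟩ := hex; exact ⟨i, hi, hp, hd⟩)
  intro hEq
  have hEq' := congrArg String.toList hEq
  simp only [String.toList_ofList] at hEq'
  have hlen := congrArg List.length hEq'
  simp only [List.length_append, List.length_replicate] at hlen
  omega
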